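-- pv_equiv track=rewrite | github.com/NGBigField/KagomePeriodicBP | src/lattices/edges.py | edges_dict_from_edges_list
-- ===== SOURCE A (Python) =====
-- def edges_dict_from_edges_list(edges_list:list[list[str]])->dict[str, tuple[int, int]]:
--     vertices = {}
--     for i, i_edges in enumerate(edges_list):
--         for e in i_edges:
--             if e in vertices:
--                 (j1,j2) = vertices[e]
--                 vertices[e] = (i,j1)
--             else:
--                 vertices[e] = (i,i)
--     return vertices
-- ===== SOURCE B (Python) =====
-- def edges_dict_from_edges_list(edges_list):
--     # pass 1: group, per edge label, the ordered list of row indices that mention it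
--     occ = {}
--     for i, i_edges in enumerate(edges_list):
--         for e in i_edges:
--             occ.setdefault(e, []).append(i)
--     # pass 2: derive the vertex pair from each group: (last, second-to-last or last)
--     return {e: (v[-1], v[-2] if len(v) > 1 else v[-1]) for e, v in occ.items()}
-- ===== Notes on version B (the rewrite author's own statement) =====
-- stated objective: alternative
-- what changed: Instead of maintaining and rewriting the vertex pair on every occurrence, B first groups all row indices per edge label in one pass, then derives each pair (last, second-to-last or last) in a separate dict-comprehension pass.
import Mathlib
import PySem

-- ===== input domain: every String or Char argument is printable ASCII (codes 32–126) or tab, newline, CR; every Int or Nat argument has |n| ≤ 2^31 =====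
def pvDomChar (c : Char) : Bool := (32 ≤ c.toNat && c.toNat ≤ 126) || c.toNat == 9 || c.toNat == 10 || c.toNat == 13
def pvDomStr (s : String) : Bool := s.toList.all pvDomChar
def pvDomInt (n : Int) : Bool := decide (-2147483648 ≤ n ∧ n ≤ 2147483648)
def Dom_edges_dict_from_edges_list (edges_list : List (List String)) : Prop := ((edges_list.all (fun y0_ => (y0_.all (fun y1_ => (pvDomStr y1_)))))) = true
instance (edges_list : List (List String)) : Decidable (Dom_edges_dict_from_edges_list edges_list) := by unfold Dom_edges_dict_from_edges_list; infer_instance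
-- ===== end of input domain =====

-- B groups row indices per edge label in one pass, then derives each pair in a second map pass
-- (alternative decomposition, same cost); proved equal to A on all inputs.


-- ===== PORT A =====
def edges_dict_from_edges_list (edges_list : List (List String)) : List (String × Int × Int) :=
  ((PySem.List.enumerate edges_list).foldl (fun vertices ie =>
      ie.2.foldl (fun vertices e =>
        match vertices.get? e with
        | some j => vertices.insert e (ie.1, j.1)
        | none => vertices.insert e (ie.1, ie.1)) vertices)
    (PySem.Dict.empty : PySem.Dict String (Int × Int))).items

-- ===== PORT B =====
-- B helper: (v[-1], v[-2] if len(v) > 1 else v[-1]); groups are nonempty so the .getD 0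
-- default of the Option-valued index is never taken (exact on every input B is run on).
def pvPairOf (v : List Int) : Int × Int :=
  let last := (PySem.List.pyGet? v (-1)).getD 0
  (last, if 1 < v.length then (PySem.List.pyGet? v (-2)).getD 0 else last)

def edges_dict_from_edges_list_alt (edges_list : List (List String)) : List (String × Int × Int) :=
  let occ := (PySem.List.enumerate edges_list).foldl (fun occ ie =>
      ie.2.foldl (fun occ e => occ.modify e [] (· ++ [ie.1])) occ)
    (PySem.Dict.empty : PySem.Dict String (List Int))
  occ.items.map (fun p => (p.1, pvPairOf p.2))

-- ===== PRECONDITION & SPEC =====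
def Spec_edges_dict_from_edges_list (edges_list : List (List String)) (out : List (String × Int × Int)) : Prop := out = edges_dict_from_edges_list_alt edges_list
instance (edges_list : List (List String)) (out : List (String × Int × Int)) : Decidable (Spec_edges_dict_from_edges_list edges_list out) := by unfold Spec_edges_dict_from_edges_list; infer_instance

-- ===== CLAIM (what is proved, stated in full; the proofs are below) =====
def Claim_equal_edges_dict_from_edges_list : Prop := ∀ (edges_list : List (List String)), Dom_edges_dict_from_edges_list edges_list → Spec_edges_dict_from_edges_list edges_list (edges_dict_from_edges_list edges_list)

-- ===== LEMMAS AND PROOFS =====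

-- the value-map that turns B's grouping dict into A's pair dict
def pvF (d : PySem.Dict String (List Int)) : PySem.Dict String (Int × Int) :=
  PySem.Dict.mk (d.items.map (fun p => (p.1, pvPairOf p.2)))

-- all group lists are nonempty
def pvNE (d : PySem.Dict String (List Int)) : Prop := ∀ p ∈ d.items, p.2 ≠ []

theorem pvF_contains (d : PySem.Dict String (List Int)) (k : String) :
    (pvF d).contains k = d.contains k := by
  simp [pvF, PySem.Dict.contains, List.any_map, Function.comp_def]

theorem pvF_get? (d : PySem.Dict String (List Int)) (k : String) :
    (pvF d).get? k = (d.get? k).map pvPairOf := by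
  simp [pvF, PySem.Dict.get?, List.find?_map, Function.comp_def, Option.map_map]

theorem pvF_insert (d : PySem.Dict String (List Int)) (k : String) (v : List Int) :
    pvF (d.insert k v) = (pvF d).insert k (pvPairOf v) := by
  unfold PySem.Dict.insert
  rw [pvF_contains]
  split_ifs with h
  · simp only [pvF, List.map_map]
    congr 1
    apply List.map_congr_left
    intro p _
    by_cases hp : p.1 == k <;> simp [Function.comp, hp]
  · simp [pvF]

theorem pvPairOf_append (v : List Int) (i : Int) (hv : v ≠ []) :
    pvPairOf (v ++ [i]) = (i, (pvPairOf v).1) := by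
  have hl : 0 < v.length := List.length_pos_iff.mpr hv
  have h2 : PySem.List.pyGet? (v ++ [i]) (-2) = (v ++ [i])[(v ++ [i]).length - 2]? := by
    apply PySem.List.pyGet?_neg_ofNat (v ++ [i]) 2 (by omega) (by simp; omega)
  simp only [pvPairOf, h2,
    List.length_append, List.length_singleton, PySem.List.pyGet?_neg_one]
  have hidx : v.length + 1 - 2 = v.length - 1 := by omega
  rw [hidx, List.getElem?_append_left (by omega), ← List.getLast?_eq_getElem?]
  simp [hl]

theorem pvNE_insert (d : PySem.Dict String (List Int)) (k : String) (v : List Int)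
    (hd : pvNE d) (hv : v ≠ []) : pvNE (d.insert k v) := by
  intro p hp
  rw [PySem.Dict.mem_items_insert] at hp
  rcases hp with rfl | ⟨hp, _⟩
  · exact hv
  · exact hd p hp

theorem pv_step (d : PySem.Dict String (List Int)) (i : Int) (e : String) (hd : pvNE d) :
    (match (pvF d).get? e with
      | some j => (pvF d).insert e (i, j.1)
      | none => (pvF d).insert e (i, i)) = pvF (d.modify e [] (· ++ [i]))
    ∧ pvNE (d.modify e [] (· ++ [i])) := by
  have hmod : d.modify e [] (· ++ [i]) = d.insert e (d.getD e [] ++ [i]) := rfl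
  rw [hmod]
  rcases h : d.get? e with _ | v
  · have hD : d.getD e [] = [] := by simp [PySem.Dict.getD, h]
    rw [pvF_get?, h, pvF_insert, hD]
    refine ⟨?_, pvNE_insert _ _ _ hd (by simp)⟩
    simp [pvPairOf, PySem.List.pyGet?_neg_one]
  · have hv : v ≠ [] := hd (e, v) (PySem.Dict.mem_items_of_get?_eq_some d h)
    have hD : d.getD e [] = v := by simp [PySem.Dict.getD, h]
    rw [pvF_get?, h, pvF_insert, hD, pvPairOf_append v i hv]
    exact ⟨rfl, pvNE_insert _ _ _ hd (by simp)⟩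

theorem pv_inner (es : List String) (i : Int) (d : PySem.Dict String (List Int)) (hd : pvNE d) :
    es.foldl (fun vertices e =>
        match vertices.get? e with
        | some j => vertices.insert e (i, j.1)
        | none => vertices.insert e (i, i)) (pvF d)
      = pvF (es.foldl (fun occ e => occ.modify e [] (· ++ [i])) d)
    ∧ pvNE (es.foldl (fun occ e => occ.modify e [] (· ++ [i])) d) := by
  induction es generalizing d with
  | nil => exact ⟨rfl, hd⟩
  | cons e es ih =>
    obtain ⟨h1, h2⟩ := pv_step d i e hd
    simpa only [List.foldl_cons, h1] using ih _ h2

theorem pv_outer (l : List (Int × List String)) (d : PySem.Dict String (List Int)) (hd : pvNE d) :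
    l.foldl (fun vertices ie =>
        ie.2.foldl (fun vertices e =>
          match vertices.get? e with
          | some j => vertices.insert e (ie.1, j.1)
          | none => vertices.insert e (ie.1, ie.1)) vertices) (pvF d)
      = pvF (l.foldl (fun occ ie =>
          ie.2.foldl (fun occ e => occ.modify e [] (· ++ [ie.1])) occ) d) := by
  induction l generalizing d with
  | nil => rfl
  | cons ie l ih =>
    obtain ⟨h1, h2⟩ := pv_inner ie.2 ie.1 d hd
    simpa only [List.foldl_cons, h1] using ih _ h2

-- ===== VERDICT (by name: the statement is the Claim_ definition above) =====
theorem edges_dict_from_edges_list_spec : Claim_equal_edges_dict_from_edges_list := by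
  intro el _
  unfold Spec_edges_dict_from_edges_list edges_dict_from_edges_list edges_dict_from_edges_list_alt
  have h := pv_outer (PySem.List.enumerate el) PySem.Dict.empty (by intro p hp; simp [PySem.Dict.empty] at hp)
  rw [show (PySem.Dict.empty : PySem.Dict String (Int × Int)) = pvF PySem.Dict.empty from rfl, h]
  rfl
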